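-- pv_equiv track=rewrite | github.com/emtnansaadmhm-lang/whisper-wa2 | Backend/parser.py | group_messages_by_chat
-- ===== SOURCE A (Python) =====
-- def group_messages_by_chat(messages):
--     chats = {}
--
--     for msg in messages:
--         jid = msg["remote_jid"]
--         if jid not in chats:
--             chats[jid] = []
--         chats[jid].append(msg)
--
--     return chats
-- ===== SOURCE B (Python) =====
-- def group_messages_by_chat(messages):
--     # Alternative decomposition: first collect the distinct jids in first-occurrence
--     # order, then build each chat's list by filtering the whole input per jid.
--     keys = list(dict.fromkeys(m["remote_jid"] for m in messages))
--     return {jid: [m for m in messages if m["remote_jid"] == jid] for jid in keys}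
-- ===== Notes on version B (the rewrite author's own statement) =====
-- stated objective: alternative
-- what changed: Replaces the one-pass dict accumulation (create-empty-then-append per message) with a two-phase strategy: dedup the jids in first-occurrence order, then build each group by filtering the whole message list per jid.
import Mathlib
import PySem

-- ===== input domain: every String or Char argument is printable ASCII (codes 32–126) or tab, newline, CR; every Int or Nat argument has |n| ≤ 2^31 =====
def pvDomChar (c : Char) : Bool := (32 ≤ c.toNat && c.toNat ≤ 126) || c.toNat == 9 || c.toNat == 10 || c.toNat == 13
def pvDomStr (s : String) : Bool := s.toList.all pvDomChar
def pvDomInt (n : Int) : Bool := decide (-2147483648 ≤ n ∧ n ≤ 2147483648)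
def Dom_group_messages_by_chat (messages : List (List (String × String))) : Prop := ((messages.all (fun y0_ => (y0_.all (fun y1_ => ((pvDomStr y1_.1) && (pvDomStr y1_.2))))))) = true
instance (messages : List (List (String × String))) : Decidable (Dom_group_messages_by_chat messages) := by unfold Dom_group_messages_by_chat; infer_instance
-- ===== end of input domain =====

-- B groups by first deduplicating the jids and then filtering the messages per jid,
-- instead of A's one-pass dict accumulation; alternative decomposition, same result.


-- ===== PORT A =====
-- msg["remote_jid"] raises KeyError on a message without the key; Pre_ excludes those
-- inputs, so the total form getD with dummy default "" is exact on the admitted domain.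
def group_messages_by_chat (messages : List (List (String × String))) : List (String × List (List (String × String))) :=
  (messages.foldl (fun chats msg =>
      let jid := (PySem.Dict.mk msg).getD "remote_jid" ""
      let chats := if chats.contains jid then chats
                   else chats.insert jid ([] : List (List (String × String)))
      chats.modify jid [] (fun l => l ++ [msg]))
    PySem.Dict.empty).items

-- ===== PORT B =====
def group_messages_by_chat_alt (messages : List (List (String × String))) : List (String × List (List (String × String))) :=
  let keys := PySem.List.dedup (messages.map (fun m => (PySem.Dict.mk m).getD "remote_jid" ""))
  keys.map (fun jid => (jid, messages.filter (fun m => (PySem.Dict.mk m).getD "remote_jid" "" == jid)))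

-- ===== PRECONDITION & SPEC =====
-- Pre_ excludes exactly the inputs on which A raises KeyError: a message without "remote_jid".
def Pre_group_messages_by_chat (messages : List (List (String × String))) : Prop :=
  (messages.all (fun m => (PySem.Dict.mk m).contains "remote_jid")) = true
instance (messages : List (List (String × String))) : Decidable (Pre_group_messages_by_chat messages) := by unfold Pre_group_messages_by_chat; infer_instance
def pvWitness_group_messages_by_chat : (List (List (String × String))) :=
  [[("remote_jid", "a"), ("text", "hi")], [("remote_jid", "b"), ("text", "yo")], [("remote_jid", "a"), ("text", "again")]]

def Spec_group_messages_by_chat (messages : List (List (String × String))) (out : List (String × List (List (String × String)))) : Prop := out = group_messages_by_chat_alt messages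
instance (messages : List (List (String × String))) (out : List (String × List (List (String × String)))) : Decidable (Spec_group_messages_by_chat messages out) := by unfold Spec_group_messages_by_chat; infer_instance

-- ===== CLAIM (what is proved, stated in full; the proofs are below) =====
def Claim_equal_group_messages_by_chat : Prop := ∀ (messages : List (List (String × String))), Dom_group_messages_by_chat messages → Pre_group_messages_by_chat messages → Spec_group_messages_by_chat messages (group_messages_by_chat messages)

-- ===== LEMMAS AND PROOFS =====

-- the jid read from a message (total form, exact under Pre_)
def pvJid (m : List (String × String)) : String := (PySem.Dict.mk m).getD "remote_jid" ""

-- A's loop body equals a single dict.modify with default [].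
theorem pvStep_eq_modify (d : PySem.Dict String (List (List (String × String)))) (msg : List (String × String)) :
    (let jid := (PySem.Dict.mk msg).getD "remote_jid" ""
     let d' := if d.contains jid then d else d.insert jid ([] : List (List (String × String)))
     d'.modify jid [] (fun l => l ++ [msg]))
    = d.modify (pvJid msg) [] (fun l => l ++ [msg]) := by
  simp only [pvJid]
  by_cases h : d.contains ((PySem.Dict.mk msg).getD "remote_jid" "") = true
  · simp only [h, if_pos]
  · have h' : d.contains ((PySem.Dict.mk msg).getD "remote_jid" "") = false := by
      simpa using h
    simp only [h', Bool.false_eq_true, if_neg, not_false_eq_true]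
    simp [PySem.Dict.modify, PySem.Dict.getD_insert_self, PySem.Dict.insert_insert_self,
      PySem.Dict.getD_of_not_contains d _ h']

theorem pvFoldA_eq (l : List (List (String × String))) (d : PySem.Dict String (List (List (String × String)))) :
    l.foldl (fun chats msg =>
      let jid := (PySem.Dict.mk msg).getD "remote_jid" ""
      let chats := if chats.contains jid then chats
                   else chats.insert jid ([] : List (List (String × String)))
      chats.modify jid [] (fun l => l ++ [msg])) d
    = l.foldl (fun d m => d.modify (pvJid m) [] (fun x => x ++ [m])) d := by
  induction l generalizing d with
  | nil => rfl
  | cons m t ih => simp only [List.foldl_cons]; rw [pvStep_eq_modify]; exact ih _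

theorem group_messages_by_chat_spec : Claim_equal_group_messages_by_chat := by
  intro messages _ _
  unfold Spec_group_messages_by_chat group_messages_by_chat group_messages_by_chat_alt
  rw [pvFoldA_eq]
  have hmap : (messages.map (fun m => (pvJid m, m))).foldl
      (fun (d : PySem.Dict String (List (List (String × String)))) p =>
        d.modify p.1 [] (fun x => x ++ [p.2])) PySem.Dict.empty
      = messages.foldl (fun d m => d.modify (pvJid m) [] (fun x => x ++ [m])) PySem.Dict.empty :=
    List.foldl_map
  rw [← hmap]
  have hkeys : ((messages.map (fun m => (pvJid m, m))).foldl
      (fun (d : PySem.Dict String (List (List (String × String)))) p =>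
        d.modify p.1 [] (fun x => x ++ [p.2])) PySem.Dict.empty).keys
      = PySem.Set.ofList (messages.map pvJid) := by
    rw [hmap,
      PySem.Dict.keys_foldl_modify_key messages pvJid [] (fun _ m => (fun x => x ++ [m])) PySem.Dict.empty]
    simp [PySem.Set.update, PySem.Set.ofList_eq_foldl, PySem.Dict.keys_empty]
  have hnd : ((messages.map (fun m => (pvJid m, m))).foldl
      (fun (d : PySem.Dict String (List (List (String × String)))) p =>
        d.modify p.1 [] (fun x => x ++ [p.2])) PySem.Dict.empty).keys.Nodup := by
    rw [hmap]
    exact PySem.Dict.nodup_keys_foldl_modify_key messages pvJid [] _ PySem.Dict.empty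
      (by simp [PySem.Dict.keys_empty])
  have hgetD : ∀ c, ((messages.map (fun m => (pvJid m, m))).foldl
      (fun (d : PySem.Dict String (List (List (String × String)))) p =>
        d.modify p.1 [] (fun x => x ++ [p.2])) PySem.Dict.empty).getD c []
      = messages.filter (fun m => pvJid m == c) := by
    intro c
    rw [PySem.Dict.getD_foldl_modify_append]
    simp [PySem.Dict.getD_empty, List.filter_map, List.map_map, Function.comp_def]
  rw [PySem.Dict.items_eq_map_keys _ hnd [], hkeys]
  simp only [PySem.List.dedup_eq_ofList]
  apply List.map_congr_left
  intro c _
  have := hgetD c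
  simp only [pvJid] at this ⊢
  rw [this]
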